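-- pv_equiv track=rewrite | github.com/swJeong98/ProblemSolving | Free/Programmers/LV_1/P4_모의고사.py | solution
-- ===== SOURCE A (Python) =====
-- def solution(answers):
--     answer = []
--
--     N = len(answers)
--     board_a = [0 for i in range(N+5)]
--     board_b = [0 for i in range(N+5)]
--     board_c = [0 for i in range(N+5)]
--
--     #수포자 1
--     cur = 1
--     for i in range(N) :
--         board_a[i] = cur
--         cur += 1
--         if cur == 6 : cur = 1
--
--     # 수포자 2
--     cur = 1
--     for i in range(N) :
--         if i%2 == 0 :
--             board_b[i] = 2
--             continue
--         else : board_b[i] = cur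
--         cur += 1
--         if cur == 2 : cur = 3
--         if cur == 6 : cur = 1
--
--     # 수포자 3
--     dir = [3,1,2,4,5]
--     for i in range(N) :
--         idx = (i // 2) % 5
--         board_c[i] = dir[idx]
--
--     cnt_a, cnt_b, cnt_c = 0, 0, 0
--     for i in range(N) :
--         if answers[i] == board_a[i] : cnt_a += 1
--         if answers[i] == board_b[i] : cnt_b += 1
--         if answers[i] == board_c[i] : cnt_c += 1
--
--     mx = -1
--     if mx < cnt_a :
--         mx = cnt_a
--         while answer : answer.pop()
--         answer.append(1)
--
--     if mx < cnt_b :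
--         mx = cnt_b
--         while answer : answer.pop()
--         answer.append(2)
--     elif mx == cnt_b :
--         answer.append(2)
--
--     if mx < cnt_c :
--         mx = cnt_c
--         while answer : answer.pop()
--         answer.append(3)
--     elif mx == cnt_c :
--         answer.append(3)
--
--     answer.sort()
--     return answer
-- ===== SOURCE B (Python) =====
-- def solution(answers):
--     # Histogram approach: bucket answer values by position mod 40 (lcm of the three
--     # pattern periods), then read each taker's score off the 40 histograms.
--     buckets = [{} for _ in range(40)]
--     for i, a in enumerate(answers):
--         b = buckets[i % 40]
--         b[a] = b.get(a, 0) + 1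
--     patterns = [[1, 2, 3, 4, 5],
--                 [2, 1, 2, 3, 2, 4, 2, 5],
--                 [3, 3, 1, 1, 2, 2, 4, 4, 5, 5]]
--     scores = [sum(buckets[r].get(p[r % len(p)], 0) for r in range(40)) for p in patterns]
--     best = max(scores)
--     return [k + 1 for k, s in enumerate(scores) if s == best]
-- ===== Notes on version B (the rewrite author's own statement) =====
-- stated objective: alternative
-- what changed: B replaces A's three full N-length board arrays and the incremental mx/pop/append/sort selection by a residue histogram: one pass buckets answer counts by position mod 40 (lcm of the pattern periods) into 40 dicts, each taker's score is then read off the 40 histograms without ever materialising or comparing per-position pattern arrays, and winners are chosen by max-then-filter over enumerate(scores).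
import Mathlib
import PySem

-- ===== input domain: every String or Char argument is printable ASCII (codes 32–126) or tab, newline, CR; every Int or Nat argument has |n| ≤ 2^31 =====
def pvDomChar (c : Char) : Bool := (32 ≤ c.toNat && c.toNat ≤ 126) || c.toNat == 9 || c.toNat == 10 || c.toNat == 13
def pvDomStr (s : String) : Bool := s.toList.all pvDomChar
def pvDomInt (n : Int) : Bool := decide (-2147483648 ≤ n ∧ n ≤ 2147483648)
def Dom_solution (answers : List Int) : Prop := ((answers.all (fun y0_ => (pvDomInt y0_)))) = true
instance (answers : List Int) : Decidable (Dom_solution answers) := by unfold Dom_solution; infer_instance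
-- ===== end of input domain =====

-- B replaces A's three N-length board arrays and incremental mx/pop/append selection by a
-- residue-histogram: answers are bucketed by position mod 40 into 40 count dicts, scores are
-- read off the histograms, winners chosen by max-then-filter (objective: alternative).

-- ===== PORT A =====
-- 수포자 1 loop: board_a[i] = cur; cur += 1; if cur == 6: cur = 1   (indices i from range(N) are Nat)
def pvBuildA : List Int → Int → List Nat → List Int
  | board, _, [] => board
  | board, cur, i :: rest =>
      let board := board.set i cur
      let cur := cur + 1
      let cur := if cur = 6 then 1 else cur
      pvBuildA board cur rest

-- 수포자 2 loop
def pvBuildB : List Int → Int → List Nat → List Int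
  | board, _, [] => board
  | board, cur, i :: rest =>
      if i % 2 = 0 then pvBuildB (board.set i 2) cur rest
      else
        let board := board.set i cur
        let cur := cur + 1
        let cur := if cur = 2 then 3 else cur
        let cur := if cur = 6 then 1 else cur
        pvBuildB board cur rest

-- 수포자 3 loop: board_c[i] = dir[(i // 2) % 5]  (i ≥ 0, so Nat / and % are Python-exact)
def pvBuildC : List Int → List Nat → List Int
  | board, [] => board
  | board, i :: rest => pvBuildC (board.set i ([3,1,2,4,5].getD ((i / 2) % 5) 0)) rest

-- counting loop (all indices are in range, so getD's default is never read)
def pvCountLoop (answers bA bB bC : List Int) : List Nat → Int × Int × Int → Int × Int × Int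
  | [], acc => acc
  | i :: rest, (ca, cb, cc) =>
      pvCountLoop answers bA bB bC rest
        (ca + (if answers.getD i 0 = bA.getD i 0 then 1 else 0),
         cb + (if answers.getD i 0 = bB.getD i 0 then 1 else 0),
         cc + (if answers.getD i 0 = bC.getD i 0 then 1 else 0))

-- mx/answer selection chain ending in answer.sort()
def pvSelA (ca cb cc : Int) : List Int :=
  let mx : Int := -1
  let ans : List Int := []
  let p1 := if mx < ca then (ca, [(1:Int)]) else (mx, ans)
  let mx := p1.1; let ans := p1.2
  let p2 := if mx < cb then (cb, [(2:Int)]) else if mx = cb then (mx, ans ++ [2]) else (mx, ans)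
  let mx := p2.1; let ans := p2.2
  let p3 := if mx < cc then (cc, [(3:Int)]) else if mx = cc then (mx, ans ++ [3]) else (mx, ans)
  PySem.List.sorted p3.2 (fun x => x) false

def solution (answers : List Int) : List Int :=
  let N := answers.length
  let board_a := pvBuildA (List.replicate (N + 5) 0) 1 (List.range N)
  let board_b := pvBuildB (List.replicate (N + 5) 0) 1 (List.range N)
  let board_c := pvBuildC (List.replicate (N + 5) 0) (List.range N)
  let c := pvCountLoop answers board_a board_b board_c (List.range N) (0, 0, 0)
  pvSelA c.1 c.2.1 c.2.2

-- ===== PORT B =====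
-- 'b = buckets[i % 40]; b[a] = b.get(a, 0) + 1' — an in-place dict update inside the list;
-- i ≥ 0 here, so Python's i % 40 is the Nat mod (exact via PySem.Int.mod on the enumerate index)
def pvStep (bs : List (PySem.Dict Int Int)) (ia : Int × Int) : List (PySem.Dict Int Int) :=
  bs.modify (PySem.Int.mod ia.1 40).toNat (fun b => b.modify ia.2 0 (· + 1))

def solution_alt (answers : List Int) : List Int :=
  let buckets0 : List (PySem.Dict Int Int) := (List.range 40).map (fun _ => PySem.Dict.empty)
  let buckets := (PySem.List.enumerate answers 0).foldl pvStep buckets0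
  let patterns : List (List Int) := [[1,2,3,4,5], [2,1,2,3,2,4,2,5], [3,3,1,1,2,2,4,4,5,5]]
  -- sum(buckets[r].get(p[r % len(p)], 0) for r in range(40)); r and len(p) are Nat, mod is exact
  let scores := patterns.map (fun p =>
    (List.range 40).foldl
      (fun s r => s + (buckets.getD r PySem.Dict.empty).getD (p.getD (r % p.length) 0) 0) 0)
  -- max(scores): scores has 3 elements, so maxD's default is never read
  let best := PySem.List.maxD scores (fun y => y) 0
  ((PySem.List.enumerate scores 0).filter (fun ks => ks.2 == best)).map (fun ks => ks.1 + 1)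

-- ===== PRECONDITION & SPEC =====
def Spec_solution (answers : List Int) (out : List Int) : Prop := out = solution_alt answers
instance (answers : List Int) (out : List Int) : Decidable (Spec_solution answers out) := by unfold Spec_solution; infer_instance

-- ===== CLAIM (what is proved, stated in full; the proofs are below) =====
def Claim_equal_solution : Prop := ∀ (answers : List Int), Dom_solution answers → Spec_solution answers (solution answers)

-- ===== LEMMAS AND PROOFS =====

-- the cyclic column patterns, as functions of the (Nat) position
def patA (i : Nat) : Int := ([1,2,3,4,5] : List Int).getD (i % 5) 0
def patB (i : Nat) : Int := ([2,1,2,3,2,4,2,5] : List Int).getD (i % 8) 0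
def patC (i : Nat) : Int := ([3,3,1,1,2,2,4,4,5,5] : List Int).getD (i % 10) 0
-- taker 2's cursor value after k odd steps
def curB (k : Nat) : Int := ([1,3,4,5] : List Int).getD (k % 4) 0

theorem pvBuildA_untouched (l : List Nat) (board : List Int) (cur : Int) (i : Nat)
    (h : ∀ j ∈ l, j ≠ i) : (pvBuildA board cur l).getD i 0 = board.getD i 0 := by
  induction l generalizing board cur with
  | nil => rfl
  | cons j rest ih =>
      simp only [pvBuildA]
      rw [ih _ _ (fun k hk => h k (List.mem_cons_of_mem _ hk))]
      rw [List.getD, List.getD, List.getElem?_set_ne (h j (List.mem_cons_self))]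

theorem pvBuildB_untouched (l : List Nat) (board : List Int) (cur : Int) (i : Nat)
    (h : ∀ j ∈ l, j ≠ i) : (pvBuildB board cur l).getD i 0 = board.getD i 0 := by
  induction l generalizing board cur with
  | nil => rfl
  | cons j rest ih =>
      simp only [pvBuildB]
      split <;>
      · rw [ih _ _ (fun k hk => h k (List.mem_cons_of_mem _ hk))]
        rw [List.getD, List.getD, List.getElem?_set_ne (h j (List.mem_cons_self))]

theorem pvBuildC_untouched (l : List Nat) (board : List Int) (i : Nat)
    (h : ∀ j ∈ l, j ≠ i) : (pvBuildC board l).getD i 0 = board.getD i 0 := by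
  induction l generalizing board with
  | nil => rfl
  | cons j rest ih =>
      simp only [pvBuildC]
      rw [ih _ (fun k hk => h k (List.mem_cons_of_mem _ hk))]
      rw [List.getD, List.getD, List.getElem?_set_ne (h j (List.mem_cons_self))]
      rfl

theorem patA_step (s : Nat) :
    (if patA s + 1 = 6 then (1 : Int) else patA s + 1) = patA (s + 1) := by
  have h5 : s % 5 < 5 := Nat.mod_lt _ (by norm_num)
  have h1 : (s + 1) % 5 = if s % 5 = 4 then 0 else s % 5 + 1 := by split <;> omega
  simp only [patA, h1]
  interval_cases h : s % 5 <;> simp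

theorem curB_step (k : Nat) :
    (if (if curB k + 1 = 2 then (3 : Int) else curB k + 1) = 6 then (1 : Int)
     else if curB k + 1 = 2 then 3 else curB k + 1) = curB (k + 1) := by
  have h4 : k % 4 < 4 := Nat.mod_lt _ (by norm_num)
  have h1 : (k + 1) % 4 = if k % 4 = 3 then 0 else k % 4 + 1 := by split <;> omega
  simp only [curB, h1]
  interval_cases h : k % 4 <;> simp

theorem patB_even (s : Nat) (h : s % 2 = 0) : patB s = 2 := by
  have h8 : s % 8 < 8 := Nat.mod_lt _ (by norm_num)
  have h2 : s % 8 % 2 = 0 := by omega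
  simp only [patB]
  interval_cases hh : s % 8 <;> simp_all

theorem patB_odd (s : Nat) (h : s % 2 = 1) : patB s = curB (s / 2) := by
  have h8 : s % 8 < 8 := Nat.mod_lt _ (by norm_num)
  have h2 : s % 8 % 2 = 1 := by omega
  have hd : s / 2 % 4 = s % 8 / 2 := by omega
  simp only [patB, curB, hd]
  interval_cases hh : s % 8 <;> simp_all

theorem patC_eq (i : Nat) : ([3,1,2,4,5] : List Int).getD (i / 2 % 5) 0 = patC i := by
  have h10 : i % 10 < 10 := Nat.mod_lt _ (by norm_num)
  have hd : i / 2 % 5 = i % 10 / 2 := by omega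
  simp only [patC, hd]
  interval_cases hh : i % 10 <;> simp_all

theorem pvBuildA_spec (n s : Nat) (board : List Int)
    (hlen : s + n ≤ board.length) :
    ∀ i, s ≤ i → i < s + n →
      (pvBuildA board (patA s) (List.range' s n)).getD i 0 = patA i := by
  induction n generalizing s board with
  | zero => intro i h1 h2; omega
  | succ n ih =>
      intro i h1 h2
      rw [List.range'_succ]
      simp only [pvBuildA, patA_step]
      rcases eq_or_lt_of_le h1 with rfl | hlt
      · rw [pvBuildA_untouched _ _ _ _ (by intro j hj; have := List.mem_range'.mp hj; omega)]
        rw [List.getD, List.getElem?_set_self (by omega)]; rfl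
      · exact ih (s + 1) _ (by simp only [List.length_set]; omega) i hlt (by omega)

theorem pvBuildB_spec (n s : Nat) (board : List Int)
    (hlen : s + n ≤ board.length) :
    ∀ i, s ≤ i → i < s + n →
      (pvBuildB board (curB (s / 2)) (List.range' s n)).getD i 0 = patB i := by
  induction n generalizing s board with
  | zero => intro i h1 h2; omega
  | succ n ih =>
      intro i h1 h2
      rw [List.range'_succ]
      by_cases hpar : s % 2 = 0
      · simp only [pvBuildB, hpar, reduceIte]
        have hcur : curB ((s + 1) / 2) = curB (s / 2) := by
          have : (s + 1) / 2 = s / 2 := by omega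
          rw [this]
        rcases eq_or_lt_of_le h1 with rfl | hlt
        · rw [pvBuildB_untouched _ _ _ _ (by intro j hj; have := List.mem_range'.mp hj; omega)]
          rw [List.getD, List.getElem?_set_self (by omega)]
          simp [patB_even s hpar]
        · rw [← hcur]
          exact ih (s + 1) _ (by simp only [List.length_set]; omega) i hlt (by omega)
      · have hodd : s % 2 = 1 := by omega
        simp only [pvBuildB, hodd]
        rw [if_neg Nat.one_ne_zero, curB_step]
        have hs1 : (s + 1) / 2 = s / 2 + 1 := by omega
        rcases eq_or_lt_of_le h1 with rfl | hlt
        · rw [pvBuildB_untouched _ _ _ _ (by intro j hj; have := List.mem_range'.mp hj; omega)]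
          rw [List.getD, List.getElem?_set_self (by omega)]
          simp [patB_odd s hodd]
        · rw [show s / 2 + 1 = (s + 1) / 2 from hs1.symm]
          exact ih (s + 1) _ (by simp only [List.length_set]; omega) i hlt (by omega)

theorem pvBuildC_spec (n s : Nat) (board : List Int)
    (hlen : s + n ≤ board.length) :
    ∀ i, s ≤ i → i < s + n →
      (pvBuildC board (List.range' s n)).getD i 0 = patC i := by
  induction n generalizing s board with
  | zero => intro i h1 h2; omega
  | succ n ih =>
      intro i h1 h2
      rw [List.range'_succ]
      simp only [pvBuildC]
      rcases eq_or_lt_of_le h1 with rfl | hlt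
      · rw [pvBuildC_untouched _ _ _ (by intro j hj; have := List.mem_range'.mp hj; omega)]
        rw [List.getD, List.getElem?_set_self (by omega)]
        exact patC_eq s
      · exact ih (s + 1) _ (by simp only [List.length_set]; omega) i hlt (by omega)

-- the common canonical count: fold over positions with the pattern tables
def cntRange (answers : List Int) : List Nat → Int × Int × Int → Int × Int × Int
  | [], acc => acc
  | i :: rest, (ca, cb, cc) =>
      cntRange answers rest
        (ca + (if answers.getD i 0 = patA i then 1 else 0),
         cb + (if answers.getD i 0 = patB i then 1 else 0),
         cc + (if answers.getD i 0 = patC i then 1 else 0))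

theorem pvCountLoop_eq_cntRange (answers bA bB bC : List Int) (l : List Nat) (acc : Int × Int × Int)
    (hA : ∀ i ∈ l, bA.getD i 0 = patA i)
    (hB : ∀ i ∈ l, bB.getD i 0 = patB i)
    (hC : ∀ i ∈ l, bC.getD i 0 = patC i) :
    pvCountLoop answers bA bB bC l acc = cntRange answers l acc := by
  induction l generalizing acc with
  | nil => rfl
  | cons i rest ih =>
      obtain ⟨ca, cb, cc⟩ := acc
      simp only [pvCountLoop, cntRange,
        hA i List.mem_cons_self, hB i List.mem_cons_self, hC i List.mem_cons_self]
      exact ih _ (fun j hj => hA j (List.mem_cons_of_mem _ hj))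
        (fun j hj => hB j (List.mem_cons_of_mem _ hj))
        (fun j hj => hC j (List.mem_cons_of_mem _ hj))

theorem cntRange_nonneg (answers : List Int) (l : List Nat) (acc : Int × Int × Int)
    (h1 : 0 ≤ acc.1) (h2 : 0 ≤ acc.2.1) (h3 : 0 ≤ acc.2.2) :
    0 ≤ (cntRange answers l acc).1 ∧ 0 ≤ (cntRange answers l acc).2.1 ∧
    0 ≤ (cntRange answers l acc).2.2 := by
  induction l generalizing acc with
  | nil => exact ⟨h1, h2, h3⟩
  | cons i rest ih =>
      obtain ⟨ca, cb, cc⟩ := acc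
      simp only [cntRange]
      exact ih _ (by dsimp at h1 ⊢; split_ifs <;> omega)
        (by dsimp at h2 ⊢; split_ifs <;> omega) (by dsimp at h3 ⊢; split_ifs <;> omega)

-- ===== B-side: the bucket histograms =====

-- a taker's score as read off the 40 residue buckets
def bscore (p : List Int) (bs : List (PySem.Dict Int Int)) : Int :=
  (List.range 40).foldl
    (fun s r => s + (bs.getD r PySem.Dict.empty).getD (p.getD (r % p.length) 0) 0) 0

-- updating one point of a summed-over function shifts the sum by the difference there
theorem sum_map_range_update (n : Nat) (f g : Nat → Int) (r0 : Nat) (h0 : r0 < n) (c : Int)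
    (hne : ∀ r, r ≠ r0 → g r = f r) (he : g r0 = f r0 + c) :
    ((List.range n).map g).sum = ((List.range n).map f).sum + c := by
  induction n with
  | zero => omega
  | succ n ih =>
      rw [List.range_succ, List.map_append, List.map_append, List.sum_append, List.sum_append,
        List.map_singleton, List.map_singleton, List.sum_singleton, List.sum_singleton]
      rcases Nat.lt_or_ge r0 n with hlt | hge
      · rw [ih hlt, hne n (by omega)]; ring
      · have : r0 = n := by omega
        subst this
        have : (List.range r0).map g = (List.range r0).map f :=
          List.map_congr_left (fun a ha => hne a (by have := List.mem_range.mp ha; omega))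
        rw [this, he]; ring

-- one bucket update shifts one taker's score by exactly the match indicator
theorem bscore_step (p : List Int) (bs : List (PySem.Dict Int Int)) (s : Nat) (a : Int)
    (hlen : bs.length = 40) (hdvd : p.length ∣ 40) :
    bscore p (pvStep bs ((s : Int), a)) =
      bscore p bs + (if a = p.getD (s % p.length) 0 then 1 else 0) := by
  have hidx : (PySem.Int.mod (s : Int) 40).toNat = s % 40 := by
    have h : PySem.Int.mod (s : Int) 40 = ((s % 40 : Nat) : Int) := by
      exact_mod_cast PySem.Int.mod_natCast s 40
    rw [h]; omega
  have hmod : s % 40 % p.length = s % p.length := Nat.mod_mod_of_dvd s hdvd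
  have hr0 : s % 40 < 40 := Nat.mod_lt _ (by norm_num)
  simp only [bscore, pvStep, hidx]
  rw [PySem.List.foldl_add, PySem.List.foldl_add]
  rw [sum_map_range_update 40
    (f := fun r => (bs.getD r PySem.Dict.empty).getD (p.getD (r % p.length) 0) 0)
    (g := fun r => ((bs.modify (s % 40) (fun b => b.modify a 0 (· + 1))).getD r
      PySem.Dict.empty).getD (p.getD (r % p.length) 0) 0)
    (r0 := s % 40) hr0
    (c := if a = p.getD (s % p.length) 0 then 1 else 0) ?_ ?_]
  · ring
  · intro r hr
    dsimp only
    have : (bs.modify (s % 40) (fun b => b.modify a 0 (· + 1))).getD r PySem.Dict.empty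
        = bs.getD r PySem.Dict.empty := by
      rw [List.getD_eq_getElem?_getD, List.getD_eq_getElem?_getD, List.getElem?_modify]
      rcases h : bs[r]? with _ | b <;> simp [Ne.symm hr]
    rw [this]
  · dsimp only
    have hb : bs[s % 40]? = some (bs.getD (s % 40) PySem.Dict.empty) := by
      rw [List.getD_eq_getElem?_getD]
      rcases h : bs[s % 40]? with _ | b
      · exfalso; rw [List.getElem?_eq_none_iff] at h; omega
      · rfl
    rw [List.getD_eq_getElem?_getD, List.getElem?_modify, hb]
    rw [show (fun b : PySem.Dict Int Int => if s % 40 = s % 40 then b.modify a 0 (· + 1) else b)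
        = (fun b : PySem.Dict Int Int => b.modify a 0 (· + 1)) from funext (fun _ => if_pos rfl)]
    change ((bs.getD (s % 40) PySem.Dict.empty).modify a 0 (· + 1)).getD
      (p.getD (s % 40 % p.length) 0) 0 = _
    rw [PySem.Dict.getD_modify, hmod]
    by_cases hk : a = p.getD (s % p.length) 0
    · rw [if_pos hk.symm, if_pos hk, hk]
    · rw [if_neg (fun h => hk h.symm), if_neg hk]; ring

theorem pvStep_length (bs : List (PySem.Dict Int Int)) (ia : Int × Int) :
    (pvStep bs ia).length = bs.length := List.length_modify _ _ _

-- the whole bucket-building fold produces exactly the canonical counts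
theorem foldB_buckets (answers : List Int) : ∀ (xs : List Int) (s : Nat)
    (bs : List (PySem.Dict Int Int)), answers.drop s = xs → bs.length = 40 →
    (bscore [1,2,3,4,5] ((PySem.List.enumerate xs (s : Int)).foldl pvStep bs),
     bscore [2,1,2,3,2,4,2,5] ((PySem.List.enumerate xs (s : Int)).foldl pvStep bs),
     bscore [3,3,1,1,2,2,4,4,5,5] ((PySem.List.enumerate xs (s : Int)).foldl pvStep bs))
    = cntRange answers (List.range' s xs.length)
        (bscore [1,2,3,4,5] bs, bscore [2,1,2,3,2,4,2,5] bs, bscore [3,3,1,1,2,2,4,4,5,5] bs) := by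
  intro xs
  induction xs with
  | nil => intro s bs _ _; rfl
  | cons x rest ih =>
      intro s bs hdrop hlen
      have hx : answers.getD s 0 = x := by
        have h0 : answers[s]? = some x := by
          have := congrArg (·[0]?) hdrop
          simpa [List.getElem?_drop] using this
        simp [List.getD_eq_getElem?_getD, h0]
      have hrest : answers.drop (s + 1) = rest := by
        have := congrArg List.tail hdrop
        simpa [List.tail_drop] using this
      have hcast : (s : Int) + 1 = ((s + 1 : Nat) : Int) := by push_cast; ring
      have hlen' : (pvStep bs ((s : Int), x)).length = 40 := by rw [pvStep_length]; exact hlen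
      simp only [PySem.List.enumerate_cons, List.foldl_cons, List.length_cons, List.range'_succ,
        cntRange, hx]
      rw [hcast, ih (s + 1) _ hrest hlen']
      rw [bscore_step _ _ _ _ hlen (by norm_num), bscore_step _ _ _ _ hlen (by norm_num),
        bscore_step _ _ _ _ hlen (by norm_num)]
      rfl

-- selection: A's incremental mx/answer chain equals B's max-then-filter over enumerate
theorem sel_eq (ca cb cc : Int) (ha : 0 ≤ ca) (hb : 0 ≤ cb) (hc : 0 ≤ cc) :
    pvSelA ca cb cc =
      ((PySem.List.enumerate [ca, cb, cc] 0).filter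
        (fun ks => ks.2 == PySem.List.maxD [ca, cb, cc] (fun y => y) 0)).map
        (fun ks => ks.1 + 1) := by
  have hbest : PySem.List.maxD [ca, cb, cc] (fun y => y) 0 = max (max ca cb) cc := by
    simp only [PySem.List.maxD, PySem.List.max?_id_cons, List.foldl_cons, List.foldl_nil,
      Option.getD_some]
  have h1 : (-1 : Int) < ca := by omega
  rw [hbest]
  simp only [PySem.List.enumerate_cons, PySem.List.enumerate_nil]
  rcases lt_trichotomy ca cb with hab | hab | hab
  · rcases lt_trichotomy cb cc with hbc | hbc | hbc
    · have hM : max (max ca cb) cc = cc := by omega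
      have b0 : (ca == cc) = false := by simpa using (by omega : ca ≠ cc)
      have b1 : (cb == cc) = false := by simpa using (by omega : cb ≠ cc)
      rw [hM]
      simp [pvSelA, List.filter, h1, hab, hbc, b0, b1]
      all_goals decide
    · have hM : max (max ca cb) cc = cc := by omega
      have hac : ca < cc := by omega
      have b0 : (ca == cc) = false := by simpa using (by omega : ca ≠ cc)
      rw [hM]
      simp [pvSelA, List.filter, h1, hbc, hac, b0, lt_irrefl]
      all_goals decide
    · have hM : max (max ca cb) cc = cb := by omega
      have n3 : ¬ cb < cc := by omega
      have n4 : cb ≠ cc := by omega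
      have b0 : (ca == cb) = false := by simpa using (by omega : ca ≠ cb)
      have b2 : (cc == cb) = false := by simpa using (by omega : cc ≠ cb)
      rw [hM]
      simp [pvSelA, List.filter, h1, hab, n3, n4, b0, b2]
      all_goals decide
  · rcases lt_trichotomy ca cc with hcc | hcc | hcc
    · have hM : max (max ca cb) cc = cc := by omega
      have h1b : (-1 : Int) < cb := by omega
      have hbcc : cb < cc := by omega
      have b0 : (cb == cc) = false := by simpa using (by omega : cb ≠ cc)
      rw [hM]
      simp [pvSelA, List.filter, hab, h1b, hbcc, b0, lt_irrefl]
      all_goals decide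
    · have hM : max (max ca cb) cc = ca := by omega
      have h1b : (-1 : Int) < cb := by omega
      have hcb : cc = cb := by omega
      rw [hM]
      simp [pvSelA, List.filter, hab, hcb, h1b, lt_irrefl]
      all_goals decide
    · have hM : max (max ca cb) cc = ca := by omega
      have h1b : (-1 : Int) < cb := by omega
      have n3 : ¬ cb < cc := by omega
      have n4 : cb ≠ cc := by omega
      have b2 : (cc == cb) = false := by simpa using (by omega : cc ≠ cb)
      rw [hM]
      simp [pvSelA, List.filter, hab, h1b, n3, n4, b2, lt_irrefl]
      all_goals decide
  · rcases lt_trichotomy ca cc with hcc | hcc | hcc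
    · have hM : max (max ca cb) cc = cc := by omega
      have n2 : ¬ ca < cb := by omega
      have n2e : ca ≠ cb := by omega
      have b0 : (ca == cc) = false := by simpa using (by omega : ca ≠ cc)
      have b1 : (cb == cc) = false := by simpa using (by omega : cb ≠ cc)
      rw [hM]
      simp [pvSelA, List.filter, h1, n2, n2e, hcc, b0, b1]
      all_goals decide
    · have hM : max (max ca cb) cc = ca := by omega
      have h1c : (-1 : Int) < cc := by omega
      have n2 : ¬ cc < cb := by omega
      have n2e : cc ≠ cb := by omega
      have b1 : (cb == cc) = false := by simpa using (by omega : cb ≠ cc)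
      rw [hM]
      simp [pvSelA, List.filter, hcc, h1c, n2, n2e, b1, lt_irrefl]
      all_goals decide
    · have hM : max (max ca cb) cc = ca := by omega
      have n2 : ¬ ca < cb := by omega
      have n2e : ca ≠ cb := by omega
      have n3 : ¬ ca < cc := by omega
      have n4 : ca ≠ cc := by omega
      have b1 : (cb == ca) = false := by simpa using (by omega : cb ≠ ca)
      have b2 : (cc == ca) = false := by simpa using (by omega : cc ≠ ca)
      rw [hM]
      simp [pvSelA, List.filter, h1, n2, n2e, n3, n4, b1, b2]
      all_goals decide


theorem solution_eq (answers : List Int) : solution answers = solution_alt answers := by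
  have hA : ∀ i ∈ List.range answers.length,
      (pvBuildA (List.replicate (answers.length + 5) 0) 1 (List.range answers.length)).getD i 0 = patA i := by
    intro i hi
    have := pvBuildA_spec answers.length 0 (List.replicate (answers.length + 5) 0)
      (by simpa using Nat.le_add_right _ 5)
    rw [← List.range_eq_range'] at this
    exact this i (Nat.zero_le _) (by simpa using List.mem_range.mp hi)
  have hB : ∀ i ∈ List.range answers.length,
      (pvBuildB (List.replicate (answers.length + 5) 0) 1 (List.range answers.length)).getD i 0 = patB i := by
    intro i hi
    have := pvBuildB_spec answers.length 0 (List.replicate (answers.length + 5) 0)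
      (by simpa using Nat.le_add_right _ 5)
    rw [← List.range_eq_range'] at this
    exact this i (Nat.zero_le _) (by simpa using List.mem_range.mp hi)
  have hC : ∀ i ∈ List.range answers.length,
      (pvBuildC (List.replicate (answers.length + 5) 0) (List.range answers.length)).getD i 0 = patC i := by
    intro i hi
    have := pvBuildC_spec answers.length 0 (List.replicate (answers.length + 5) 0)
      (by simpa using Nat.le_add_right _ 5)
    rw [← List.range_eq_range'] at this
    exact this i (Nat.zero_le _) (by simpa using List.mem_range.mp hi)
  have hcnt : pvCountLoop answers _ _ _ (List.range answers.length) (0,0,0)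
      = cntRange answers (List.range answers.length) (0,0,0) :=
    pvCountLoop_eq_cntRange answers _ _ _ _ _ hA hB hC
  have hbs0 : ((List.range 40).map (fun _ => (PySem.Dict.empty : PySem.Dict Int Int))).length = 40 := by
    simp
  have hz1 : bscore [1,2,3,4,5] ((List.range 40).map (fun _ => PySem.Dict.empty)) = 0 := by decide
  have hz2 : bscore [2,1,2,3,2,4,2,5] ((List.range 40).map (fun _ => PySem.Dict.empty)) = 0 := by decide
  have hz3 : bscore [3,3,1,1,2,2,4,4,5,5] ((List.range 40).map (fun _ => PySem.Dict.empty)) = 0 := by decide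
  have hfold := foldB_buckets answers answers 0 ((List.range 40).map (fun _ => PySem.Dict.empty))
    rfl hbs0
  rw [hz1, hz2, hz3, ← List.range_eq_range',
    show ((0 : Nat) : Int) = (0 : Int) by norm_num] at hfold
  have hc1 := congrArg (fun t : Int × Int × Int => t.1) hfold
  have hc2 := congrArg (fun t : Int × Int × Int => t.2.1) hfold
  have hc3 := congrArg (fun t : Int × Int × Int => t.2.2) hfold
  simp only at hc1 hc2 hc3
  have hnn := cntRange_nonneg answers (List.range answers.length) (0,0,0)
    (by norm_num) (by norm_num) (by norm_num)
  have halt : solution_alt answers =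
      ((PySem.List.enumerate
          [bscore [1,2,3,4,5] ((PySem.List.enumerate answers 0).foldl pvStep
              ((List.range 40).map (fun _ => PySem.Dict.empty))),
           bscore [2,1,2,3,2,4,2,5] ((PySem.List.enumerate answers 0).foldl pvStep
              ((List.range 40).map (fun _ => PySem.Dict.empty))),
           bscore [3,3,1,1,2,2,4,4,5,5] ((PySem.List.enumerate answers 0).foldl pvStep
              ((List.range 40).map (fun _ => PySem.Dict.empty)))] 0).filter
        (fun ks => ks.2 == PySem.List.maxD
          [bscore [1,2,3,4,5] ((PySem.List.enumerate answers 0).foldl pvStep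
              ((List.range 40).map (fun _ => PySem.Dict.empty))),
           bscore [2,1,2,3,2,4,2,5] ((PySem.List.enumerate answers 0).foldl pvStep
              ((List.range 40).map (fun _ => PySem.Dict.empty))),
           bscore [3,3,1,1,2,2,4,4,5,5] ((PySem.List.enumerate answers 0).foldl pvStep
              ((List.range 40).map (fun _ => PySem.Dict.empty)))] (fun y => y) 0)).map
        (fun ks => ks.1 + 1) := rfl
  simp only [solution, hcnt]
  rw [halt, hc1, hc2, hc3]
  exact sel_eq _ _ _ hnn.1 hnn.2.1 hnn.2.2

-- ===== VERDICT (by name: the statement is the Claim_ definition above) =====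
theorem solution_spec : Claim_equal_solution := by
  intro answers _
  unfold Spec_solution
  exact solution_eq answers
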